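-- pv_equiv track=rewrite | github.com/isj0/Data-Structures-and-Algorithms | chapter_07/exercise5.py | pick_resume
-- ===== SOURCE A (Python) =====
-- def pick_resume(resumes):
--     if not resumes:
--         return None
--
--     eliminate = "top"
--
--     while len(resumes) > 1:
--         midpoint = len(resumes) // 2
--
--         if eliminate == "top":
--             resumes = resumes[:midpoint]
--             eliminate = "bottom"
--         elif eliminate == "bottom":
--             resumes = resumes[-midpoint:]
--             eliminate = "top"
--
--     return resumes[0]
-- ===== SOURCE B (Python) =====
-- def pick_resume(resumes):
--     # Instead of physically slicing the list each round, track the surviving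
--     # window's start and length arithmetically, then index once at the end.
--     if not resumes:
--         return None
--     start, length, top = 0, len(resumes), True
--     while length > 1:
--         half = length // 2
--         if not top:
--             start += length - half
--         length = half
--         top = not top
--     return resumes[start]
-- ===== Notes on version B (the rewrite author's own statement) =====
-- stated objective: faster
-- what changed: B replaces A's repeated list slicing with O(log n) arithmetic on a (start, length) window and a single index at the end.
import Mathlib
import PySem

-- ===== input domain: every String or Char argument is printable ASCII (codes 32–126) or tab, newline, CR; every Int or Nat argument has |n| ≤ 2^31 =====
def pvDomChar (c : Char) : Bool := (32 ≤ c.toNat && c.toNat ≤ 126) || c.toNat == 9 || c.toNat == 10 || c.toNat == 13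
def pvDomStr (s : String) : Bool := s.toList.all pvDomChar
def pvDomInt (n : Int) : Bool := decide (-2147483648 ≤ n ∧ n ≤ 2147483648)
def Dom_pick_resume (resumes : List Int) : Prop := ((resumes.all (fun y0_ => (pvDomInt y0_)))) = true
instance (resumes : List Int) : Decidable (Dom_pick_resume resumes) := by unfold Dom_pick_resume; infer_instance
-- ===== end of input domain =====

-- B replaces A's repeated physical list slicing with arithmetic on a
-- (start, length) window and a single index at the end (faster).

-- ===== PORT A =====
-- the while loop of A: 'eliminate' is a Bool (true = "top"); fuel = initial length
-- is a totality guard only (the window at least halves each iteration, so it never runs out)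
def loopA : Nat → List Int → Bool → List Int
  | 0, resumes, _ => resumes
  | fuel + 1, resumes, eliminate =>
    if 1 < resumes.length then
      let midpoint : Nat := resumes.length / 2
      if eliminate then
        loopA fuel (PySem.List.slice resumes none (some (midpoint : Int))) false
      else
        loopA fuel (PySem.List.slice resumes (some (-(midpoint : Int))) none) true
    else resumes

def pick_resume (resumes : List Int) : Option Int :=
  if resumes = [] then none
  else PySem.List.pyGet? (loopA resumes.length resumes true) 0

-- ===== PORT B =====
-- the while loop of B: arithmetic on (start, length, top); same totality fuel
def loopB : Nat → Nat → Nat → Bool → Nat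
  | 0, start, _, _ => start
  | fuel + 1, start, length, top =>
    if 1 < length then
      let half := length / 2
      loopB fuel (if top then start else start + (length - half)) half (!top)
    else start

def pick_resume_alt (resumes : List Int) : Option Int :=
  if resumes = [] then none
  else PySem.List.pyGet? resumes ((loopB resumes.length 0 resumes.length true : Nat) : Int)

-- ===== PRECONDITION & SPEC =====
def Spec_pick_resume (resumes : List Int) (out : Option Int) : Prop := out = pick_resume_alt resumes
instance (resumes : List Int) (out : Option Int) : Decidable (Spec_pick_resume resumes out) := by unfold Spec_pick_resume; infer_instance

-- ===== CLAIM (what is proved, stated in full; the proofs are below) =====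
def Claim_equal_pick_resume : Prop := ∀ (resumes : List Int), Dom_pick_resume resumes → Spec_pick_resume resumes (pick_resume resumes)

-- ===== LEMMAS AND PROOFS =====

-- the final index stays strictly inside the window
theorem loopB_lt (fuel : Nat) : ∀ (start length : Nat) (top : Bool), 0 < length →
    loopB fuel start length top < start + length := by
  induction fuel with
  | zero => intro s l t h; simp only [loopB]; omega
  | succ f ih =>
    intro s l t h
    simp only [loopB]
    by_cases hl : 1 < l
    · simp only [hl, if_true]
      have := ih (if t then s else s + (l - l / 2)) (l / 2) (!t) (by omega)
      split_ifs at this ⊢ <;> omega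
    · simp only [hl, if_false]; omega

-- the start accumulator is a pure offset
theorem loopB_shift (fuel : Nat) : ∀ (start length : Nat) (top : Bool),
    loopB fuel start length top = start + loopB fuel 0 length top := by
  induction fuel with
  | zero => intro s l t; simp [loopB]
  | succ f ih =>
    intro s l t
    by_cases hl : 1 < l
    · cases t with
      | false =>
        simp only [loopB, hl, if_true, Bool.false_eq_true, if_false, Bool.not_false,
          Nat.zero_add]
        rw [ih (s + (l - l / 2)), ih (l - l / 2)]
        omega
      | true =>
        simp only [loopB, hl, if_true, Bool.not_true]
        exact ih s (l / 2) false
    · simp [loopB, hl]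

-- core correspondence: A's slicing loop yields the one-element window B points at
theorem loopA_eq (fuel : Nat) : ∀ (l : List Int) (t : Bool), 0 < l.length → l.length ≤ fuel →
    loopA fuel l t = (l.drop (loopB fuel 0 l.length t)).take 1 := by
  induction fuel with
  | zero => intro l t h hle; omega
  | succ f ih =>
    intro l t h hle
    by_cases hl : 1 < l.length
    · simp only [loopA, loopB, hl, if_true]
      cases t with
      | true =>
        rw [PySem.List.slice_to_natCast]
        have h1 : 0 < (l.take (l.length / 2)).length := by
          simp only [List.length_take]; omega
        have h2 : (l.take (l.length / 2)).length ≤ f := by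
          simp only [List.length_take]; omega
        rw [ih _ false h1 h2]
        have hlen : (l.take (l.length / 2)).length = l.length / 2 := by
          simp only [List.length_take]; omega
        rw [hlen]
        simp only [reduceIte, Bool.not_true]
        have hs : loopB f 0 (l.length / 2) false < l.length / 2 := by
          have := loopB_lt f 0 (l.length / 2) false (by omega); omega
        rw [List.drop_take, List.take_take]
        congr 1 <;> omega
      | false =>
        simp only [Bool.false_eq_true, if_false, Bool.not_false, Nat.zero_add]
        rw [PySem.List.slice_from_neg_natCast _ _ (by omega)]
        have h1 : 0 < (l.drop (l.length - l.length / 2)).length := by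
          simp only [List.length_drop]; omega
        have h2 : (l.drop (l.length - l.length / 2)).length ≤ f := by
          simp only [List.length_drop]; omega
        rw [ih _ true h1 h2]
        have hlen : (l.drop (l.length - l.length / 2)).length = l.length / 2 := by
          simp only [List.length_drop]; omega
        rw [hlen]
        rw [List.drop_drop, loopB_shift f (l.length - l.length / 2) (l.length / 2) true]
    · simp only [loopA, loopB, hl, if_false, List.drop_zero]
      exact (List.take_of_length_le (by omega)).symm

-- ===== VERDICT (by name: the statement is the Claim_ definition above) =====
theorem pick_resume_spec : Claim_equal_pick_resume := by
  intro resumes _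
  unfold Spec_pick_resume pick_resume pick_resume_alt
  by_cases hnil : resumes = []
  · simp [hnil]
  · simp only [hnil, if_false]
    have hlen : 0 < resumes.length := List.length_pos_of_ne_nil hnil
    rw [loopA_eq resumes.length resumes true hlen (le_refl _)]
    have hs : loopB resumes.length 0 resumes.length true < resumes.length := by
      have := loopB_lt resumes.length 0 resumes.length true hlen; omega
    rw [PySem.List.pyGet?_natCast]
    have h0 : ((0 : Int)) = ((0 : Nat) : Int) := rfl
    rw [h0, PySem.List.pyGet?_natCast]
    simp [List.getElem?_drop]
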